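-- pv_equiv track=rewrite | github.com/acgis-ving0010/gis4107-week05 | NicoleV/seqmod.py | mod_sequence
-- ===== SOURCE A (Python) =====
-- def mod_sequence(seq, skip_index=None, truncate_index=None):
--     """Given a sequence, return a modified sequence that skips the value at skip_index and ends at truncate_index.
--     """
--     modded_list = []
--     for i in range(len(seq)):
--         if i == skip_index:
--             if i == truncate_index:
--                 break
--             else:
--                 continue
--         elif i == truncate_index:
--             break
--         else:
--             modded_list.append(seq[i])
--     modded_seq = ''.join(str(v) for v in modded_list)
--     return modded_seq
-- ===== SOURCE B (Python) =====
-- def mod_sequence(seq, skip_index=None, truncate_index=None):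
--     """Given a sequence, return a modified sequence that skips the value at skip_index and ends at truncate_index."""
--     n = len(seq)
--     end = n if truncate_index is None or truncate_index < 0 else min(truncate_index, n)
--     kept = list(seq[:end])
--     if skip_index is not None and 0 <= skip_index < end:
--         del kept[skip_index]
--     return ''.join(str(v) for v in kept)
-- ===== Notes on version B (the rewrite author's own statement) =====
-- stated objective: simpler
-- what changed: Replaces A's index-by-index loop with break/continue control flow by one slice to the effective end plus a single guarded element deletion.
import Mathlib
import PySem

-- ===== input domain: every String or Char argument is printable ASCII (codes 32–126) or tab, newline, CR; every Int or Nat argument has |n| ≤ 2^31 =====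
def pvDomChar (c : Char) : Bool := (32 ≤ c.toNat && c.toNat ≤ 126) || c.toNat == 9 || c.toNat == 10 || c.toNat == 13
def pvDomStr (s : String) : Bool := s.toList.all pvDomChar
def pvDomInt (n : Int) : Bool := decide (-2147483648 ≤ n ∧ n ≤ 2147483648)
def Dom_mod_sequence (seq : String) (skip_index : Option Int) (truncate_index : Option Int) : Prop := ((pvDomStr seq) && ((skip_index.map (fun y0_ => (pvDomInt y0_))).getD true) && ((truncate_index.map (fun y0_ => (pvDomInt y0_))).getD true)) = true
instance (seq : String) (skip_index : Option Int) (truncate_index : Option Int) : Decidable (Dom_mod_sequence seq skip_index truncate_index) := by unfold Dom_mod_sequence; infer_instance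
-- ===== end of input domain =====

-- B replaces A's index loop with break/continue by one slice plus a single guarded deletion (simpler).

-- ===== PORT A =====
-- the for-loop over range(len(seq)) with its break/continue branches, as structural
-- recursion over the characters with the running index i; break returns the empty tail
def mod_sequence_loop (skip_index truncate_index : Option Int) : List Char → Int → List Char
  | [], _ => []
  | c :: rest, i =>
    if some i = skip_index then
      if some i = truncate_index then []
      else mod_sequence_loop skip_index truncate_index rest (i + 1)
    else if some i = truncate_index then []
    else c :: mod_sequence_loop skip_index truncate_index rest (i + 1)

def mod_sequence (seq : String) (skip_index : Option Int) (truncate_index : Option Int) : String :=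
  String.ofList (mod_sequence_loop skip_index truncate_index seq.toList 0)

-- ===== PORT B =====
def mod_sequence_alt (seq : String) (skip_index : Option Int) (truncate_index : Option Int) : String :=
  let cs := seq.toList
  let n : Int := cs.length
  let e : Int := match truncate_index with
    | none => n
    | some t => if t < 0 then n else min t n
  let kept := cs.take e.toNat
  let kept := match skip_index with
    | none => kept
    | some s => if 0 ≤ s ∧ s < e then kept.eraseIdx s.toNat else kept
  String.ofList kept

-- ===== PRECONDITION & SPEC =====
def Spec_mod_sequence (seq : String) (skip_index : Option Int) (truncate_index : Option Int) (out : String) : Prop := out = mod_sequence_alt seq skip_index truncate_index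
instance (seq : String) (skip_index : Option Int) (truncate_index : Option Int) (out : String) : Decidable (Spec_mod_sequence seq skip_index truncate_index out) := by unfold Spec_mod_sequence; infer_instance

-- ===== CLAIM (what is proved, stated in full; the proofs are below) =====
def Claim_equal_mod_sequence : Prop := ∀ (seq : String) (skip_index : Option Int) (truncate_index : Option Int), Dom_mod_sequence seq skip_index truncate_index → Spec_mod_sequence seq skip_index truncate_index (mod_sequence seq skip_index truncate_index)

-- ===== LEMMAS AND PROOFS =====

-- closed form of A's loop, relative to the running index i
def loopSpec (skip_index truncate_index : Option Int) (cs : List Char) (i : Int) : List Char :=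
  match truncate_index, skip_index with
  | none, none => cs
  | none, some s => if i ≤ s then cs.eraseIdx (s - i).toNat else cs
  | some t, none => if t < 0 then cs else cs.take (t - i).toNat
  | some t, some s =>
    let base := if t < 0 then cs else cs.take (t - i).toNat
    if i ≤ s ∧ (t < 0 ∨ s < t) then base.eraseIdx (s - i).toNat else base

lemma loop_eq_spec (skip_index truncate_index : Option Int) :
    ∀ (cs : List Char) (i : Int), 0 ≤ i →
      (∀ t, truncate_index = some t → 0 ≤ t → i ≤ t) →
      mod_sequence_loop skip_index truncate_index cs i = loopSpec skip_index truncate_index cs i := by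
  intro cs
  induction cs with
  | nil =>
    intro i hi _
    cases skip_index <;> cases truncate_index <;>
      simp only [mod_sequence_loop, loopSpec] <;> split_ifs <;> simp
  | cons c rest ih =>
    intro i hi hb
    cases skip_index with
    | none =>
      cases truncate_index with
      | none =>
        have ih' := ih (i + 1) (by omega) (by simp)
        simpa [mod_sequence_loop, loopSpec] using ih'
      | some t =>
        simp only [mod_sequence_loop, loopSpec, reduceCtorEq, Option.some.injEq,
          if_false]
        by_cases ht : i = t
        · subst ht
          rw [if_pos rfl, if_neg (by omega : ¬ i < 0)]
          have e0 : (i - i).toNat = 0 := by omega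
          simp [e0]
        · rw [if_neg ht]
          have ih' := ih (i + 1) (by omega)
            (by intro t' ht' h0; injection ht' with h'; subst h'
                have := hb t rfl h0; omega)
          simp only [mod_sequence_loop, loopSpec, reduceCtorEq, Option.some.injEq,
            if_false] at ih'
          rw [ih']
          rcases lt_or_ge t 0 with h | h
          · rw [if_pos h, if_pos h]
          · have hit : i < t := by have := hb t rfl h; omega
            rw [if_neg (not_lt.mpr h), if_neg (not_lt.mpr h)]
            have e1 : (t - i).toNat = (t - (i + 1)).toNat + 1 := by omega
            rw [e1, List.take_succ_cons]
    | some s =>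
      cases truncate_index with
      | none =>
        have ih' := ih (i + 1) (by omega) (by simp)
        simp only [mod_sequence_loop, loopSpec, reduceCtorEq, Option.some.injEq,
          if_false] at ih' ⊢
        by_cases hsi : i = s
        · subst hsi
          rw [if_pos rfl, ih', if_neg (by omega : ¬ i + 1 ≤ i), if_pos (le_refl i)]
          have e0 : (i - i).toNat = 0 := by omega
          simp [e0]
        · rw [if_neg hsi, ih']
          by_cases h1 : i + 1 ≤ s
          · rw [if_pos h1, if_pos (by omega : i ≤ s)]
            have e1 : (s - i).toNat = (s - (i + 1)).toNat + 1 := by omega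
            rw [e1, List.eraseIdx_cons_succ]
          · rw [if_neg h1, if_neg (by omega : ¬ i ≤ s)]
      | some t =>
        simp only [mod_sequence_loop, loopSpec, reduceCtorEq, Option.some.injEq,
          if_false]
        by_cases hsi : i = s
        · subst hsi
          rw [if_pos rfl]
          by_cases hti : i = t
          · subst hti
            rw [if_pos rfl, if_neg (by omega : ¬ i < 0)]
            have e0 : (i - i).toNat = 0 := by omega
            split_ifs <;> simp [e0]
          · rw [if_neg hti]
            have ih' := ih (i + 1) (by omega)
              (by intro t' ht' h0; injection ht' with h'; subst h'
                  have := hb t rfl h0; omega)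
            simp only [mod_sequence_loop, loopSpec, reduceCtorEq, Option.some.injEq,
              if_false] at ih'
            rw [ih']
            rcases lt_or_ge t 0 with h | h
            · rw [if_pos h, if_pos h,
                if_neg (by omega : ¬ (i + 1 ≤ i ∧ (t < 0 ∨ i < t))),
                if_pos (by exact ⟨le_refl i, Or.inl h⟩)]
              have e0 : (i - i).toNat = 0 := by omega
              simp [e0]
            · have hit : i < t := by have := hb t rfl h; omega
              rw [if_neg (not_lt.mpr h), if_neg (not_lt.mpr h),
                if_neg (by omega : ¬ (i + 1 ≤ i ∧ (t < 0 ∨ i < t))),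
                if_pos (by exact ⟨le_refl i, Or.inr hit⟩)]
              have e1 : (t - i).toNat = (t - (i + 1)).toNat + 1 := by omega
              have e0 : (i - i).toNat = 0 := by omega
              rw [e1, List.take_succ_cons]
              simp [e0]
        · rw [if_neg hsi]
          by_cases hti : i = t
          · subst hti
            rw [if_pos rfl, if_neg (by omega : ¬ i < 0),
              if_neg (by omega : ¬ (i ≤ s ∧ (i < 0 ∨ s < i)))]
            have e0 : (i - i).toNat = 0 := by omega
            simp [e0]
          · rw [if_neg hti]
            have ih' := ih (i + 1) (by omega)
              (by intro t' ht' h0; injection ht' with h'; subst h'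
                  have := hb t rfl h0; omega)
            simp only [mod_sequence_loop, loopSpec, reduceCtorEq, Option.some.injEq,
              if_false] at ih'
            rw [ih']
            rcases lt_or_ge t 0 with h | h
            · rw [if_pos h, if_pos h]
              by_cases h1 : i + 1 ≤ s
              · rw [if_pos ⟨h1, Or.inl h⟩, if_pos ⟨by omega, Or.inl h⟩]
                have e1 : (s - i).toNat = (s - (i + 1)).toNat + 1 := by omega
                rw [e1, List.eraseIdx_cons_succ]
              · rw [if_neg (by omega : ¬ (i + 1 ≤ s ∧ (t < 0 ∨ s < t))),
                  if_neg (by omega : ¬ (i ≤ s ∧ (t < 0 ∨ s < t)))]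
            · have hit : i < t := by have := hb t rfl h; omega
              rw [if_neg (not_lt.mpr h), if_neg (not_lt.mpr h)]
              have e1 : (t - i).toNat = (t - (i + 1)).toNat + 1 := by omega
              rw [e1, List.take_succ_cons]
              by_cases h1 : i + 1 ≤ s ∧ s < t
              · rw [if_pos ⟨h1.1, Or.inr h1.2⟩, if_pos ⟨by omega, Or.inr h1.2⟩]
                have e2 : (s - i).toNat = (s - (i + 1)).toNat + 1 := by omega
                rw [e2, List.eraseIdx_cons_succ]
              · rw [if_neg (by omega : ¬ (i + 1 ≤ s ∧ (t < 0 ∨ s < t))),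
                  if_neg (by omega : ¬ (i ≤ s ∧ (t < 0 ∨ s < t)))]

-- ===== VERDICT (by name: the statement is the Claim_ definition above) =====
theorem mod_sequence_spec : Claim_equal_mod_sequence := by
  intro seq skip_index truncate_index _
  unfold Spec_mod_sequence mod_sequence mod_sequence_alt
  rw [loop_eq_spec skip_index truncate_index seq.toList 0 le_rfl
      (by intro t ht h0; exact h0)]
  set cs := seq.toList with hcs
  have takeAll : cs.take ((cs.length : Int)).toNat = cs := by simp
  have etake : ∀ u : Int, 0 ≤ u → cs.take (min u (cs.length : Int)).toNat = cs.take u.toNat := by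
    intro u hu
    rcases lt_or_ge u ((cs.length : Int)) with h' | h'
    · congr 1; omega
    · rw [min_eq_right h', List.take_of_length_le (by omega), List.take_of_length_le (by omega)]
  cases truncate_index with
  | none =>
    cases skip_index with
    | none => simp [loopSpec]
    | some s =>
      simp only [loopSpec, sub_zero]
      rw [takeAll]
      split_ifs with h1 h2 h2 <;> first
        | rfl
        | omega
        | rw [List.eraseIdx_of_length_le (by omega)]
  | some t =>
    cases skip_index with
    | none =>
      simp only [loopSpec, sub_zero]
      split_ifs with h1
      · rw [takeAll]
      · rw [etake t (by omega)]
    | some s =>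
      simp only [loopSpec, sub_zero]
      rcases lt_or_ge t 0 with h | h
      · rw [if_pos h, if_pos h, takeAll]
        split_ifs with h1 h2 h2 <;> first
          | rfl
          | omega
          | rw [List.eraseIdx_of_length_le (by omega)]
      · rw [if_neg (not_lt.mpr h), if_neg (not_lt.mpr h), etake t h]
        split_ifs with h1 h2 h2
        · rfl
        · rw [List.eraseIdx_of_length_le (by simp; omega)]
        · omega
        · rfl
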